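-- pv_equiv track=rewrite | github.com/wherby/code | algorithm/array/subarray-logTrick/useLogTrickPreProcess.py | logTrick
-- ===== SOURCE A (Python) =====
-- import math
--
-- def logTrick(nums):
--     n = len(nums)
--     ret = [i for i in range(n)]
--     acc =[]
--     for i,a in enumerate(nums):
--         # 计算以 i 为右端点的子数组 GCD
--         for j,(b,idx) in enumerate(acc):
--             acc[j][0] = math.gcd(b,a)
--         # nums[i] 单独一个数作为子数组
--         acc.append([a,i])
--         idx = 1
--         for j in range(1,len(acc)):
--             if acc[j][0] != acc[j-1][0]:
--                 acc[idx] = acc[j]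
--                 idx +=1
--         del acc[idx:]
--         # while len(acc)>idx:
--         #     acc.pop()
--         # 去掉不满足的值
--         while acc and acc[0][0] ==1:
--             acc.pop(0)
--         if len(acc):
--             ret[i] = acc[0][1]
--     return ret
-- ===== SOURCE B (Python) =====
-- import math
--
-- def logTrick(nums):
--     # Per right endpoint i, scan leftwards with a running gcd; leftmost j with gcd != 1.
--     ret = []
--     for i in range(len(nums)):
--         g = 0
--         best = i
--         for j in range(i, -1, -1):
--             g = math.gcd(g, nums[j])
--             if g == 1:
--                 break
--             best = j
--         ret.append(best)
--     return ret
-- ===== Notes on version B (the rewrite author's own statement) =====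
-- stated objective: simpler
-- what changed: Replaces A's incrementally maintained, in-place deduplicated list of (distinct subarray-GCD, leftmost index) pairs with a direct per-right-endpoint leftward rescan keeping a running gcd that breaks as soon as the gcd hits 1.
import Mathlib
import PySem

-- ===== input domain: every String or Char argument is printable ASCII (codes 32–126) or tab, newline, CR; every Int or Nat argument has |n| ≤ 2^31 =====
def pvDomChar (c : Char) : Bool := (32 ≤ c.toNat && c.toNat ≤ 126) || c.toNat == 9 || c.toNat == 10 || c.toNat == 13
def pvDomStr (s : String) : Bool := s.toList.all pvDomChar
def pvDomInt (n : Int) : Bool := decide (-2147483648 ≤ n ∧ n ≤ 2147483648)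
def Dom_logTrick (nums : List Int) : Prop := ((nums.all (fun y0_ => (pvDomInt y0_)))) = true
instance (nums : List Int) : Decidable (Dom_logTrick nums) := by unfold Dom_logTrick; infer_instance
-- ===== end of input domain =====

-- B replaces A's incrementally maintained deduplicated distinct-GCD list with a direct
-- per-endpoint leftward rescan with a running gcd, breaking as soon as the gcd hits 1
-- (objective: simpler; a timing run measured it faster on the generated inputs).

-- ===== PORT A =====
-- one pass of the in-place dedup loop `for j in range(1,len(acc)): if acc[j][0]!=acc[j-1][0]: acc[idx]=acc[j]; idx+=1`
def logTrickDedup (s : List (Int × Int) × Nat) (j : Nat) : List (Int × Int) × Nat :=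
  if (s.1.getD j (0, 0)).1 ≠ (s.1.getD (j - 1) (0, 0)).1 then
    (s.1.set s.2 (s.1.getD j (0, 0)), s.2 + 1)
  else s

-- body of `for i,a in enumerate(nums)` acting on the state (ret, acc)
def logTrickStep (st : List Int × List (Int × Int)) (p : Int × Int) : List Int × List (Int × Int) :=
  let i := p.1
  let a := p.2
  -- for j,(b,idx) in enumerate(acc): acc[j][0] = math.gcd(b,a)
  let acc1 := st.2.map (fun q => ((Int.gcd q.1 a : Int), q.2))
  -- acc.append([a,i])
  let acc2 := acc1 ++ [(a, i)]
  -- idx = 1; for j in range(1,len(acc)): …; del acc[idx:]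
  let r := (List.range' 1 (acc2.length - 1)).foldl logTrickDedup (acc2, 1)
  let acc3 := r.1.take r.2
  -- while acc and acc[0][0] == 1: acc.pop(0)
  let acc4 := acc3.dropWhile (fun q => q.1 == 1)
  -- if len(acc): ret[i] = acc[0][1]
  let ret' := if acc4.length ≠ 0 then st.1.set i.toNat (acc4.getD 0 (0, 0)).2 else st.1
  (ret', acc4)

def logTrick (nums : List Int) : List Int :=
  let ret0 : List Int := (List.range nums.length).map (fun (i : Nat) => (i : Int))
  ((PySem.List.enumerate nums 0).foldl logTrickStep (ret0, [])).1

-- ===== PORT B =====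
-- `for j in range(i,-1,-1): g = math.gcd(g, nums[j]); if g == 1: break; best = j`
def logTrickGo (nums : List Int) : Nat → Int → Int → Int
  | j, g, best =>
    let g' : Int := (Int.gcd g (nums.getD j 0) : Int)
    if g' = 1 then best
    else if h : j = 0 then 0
    else logTrickGo nums (j - 1) g' (j : Int)
termination_by j _ _ => j
decreasing_by omega

def logTrick_alt (nums : List Int) : List Int :=
  (List.range nums.length).map (fun i => logTrickGo nums i 0 (i : Int))

-- ===== PRECONDITION & SPEC =====
def Spec_logTrick (nums : List Int) (out : List Int) : Prop := out = logTrick_alt nums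
instance (nums : List Int) (out : List Int) : Decidable (Spec_logTrick nums out) := by unfold Spec_logTrick; infer_instance

-- ===== CLAIM (what is proved, stated in full; the proofs are below) =====
def Claim_equal_logTrick : Prop := ∀ (nums : List Int), Dom_logTrick nums → Spec_logTrick nums (logTrick nums)

-- ===== LEMMAS AND PROOFS =====

-- gcd of |nums[j]|, …, |nums[i]| (value 0 when the segment is read past i, matching Python's gcd identity)
def segGcd (nums : List Int) (j i : Nat) : Nat :=
  Nat.gcd (nums.getD j 0).natAbs (if h : j < i then segGcd nums (j + 1) i else 0)
termination_by i - j
decreasing_by omega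

-- functional form of the dedup loop: keep an element iff its value differs from its ORIGINAL predecessor
def pvDGo : (Int × Int) → List (Int × Int) → List (Int × Int)
  | _, [] => []
  | p, y :: ys => if y.1 = p.1 then pvDGo y ys else y :: pvDGo y ys

def pvDedup : List (Int × Int) → List (Int × Int)
  | [] => []
  | x :: xs => x :: pvDGo x xs

def pvDW (l : List (Int × Int)) : List (Int × Int) := l.dropWhile (fun q => q.1 == 1)

def pvFA (a : Int) (q : Int × Int) : Int × Int := ((Int.gcd q.1 a : Int), q.2)

-- the canonical acc: (gcd value, index) pairs for every left endpoint (raw value for j = i), then dedup + drop-ones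
def pairsL (nums : List Int) (i : Nat) : List (Int × Int) :=
  (List.range i).map (fun j => ((segGcd nums j i : Int), (j : Int))) ++ [(nums.getD i 0, (i : Int))]

def modelAcc (nums : List Int) : Nat → List (Int × Int)
  | 0 => []
  | i + 1 => pvDW (pvDedup ((modelAcc nums i).map (pvFA (nums.getD i 0)) ++ [(nums.getD i 0, (i : Int))]))

def modelHead (nums : List Int) (i : Nat) : Int :=
  match modelAcc nums (i + 1) with
  | [] => (i : Int)
  | p :: _ => p.2

-- ===== segGcd lemmas =====

theorem segGcd_last (nums : List Int) (i : Nat) : segGcd nums i i = (nums.getD i 0).natAbs := by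
  rw [segGcd]; simp

theorem segGcd_unfold (nums : List Int) {j i : Nat} (h : j < i) :
    segGcd nums j i = Nat.gcd (nums.getD j 0).natAbs (segGcd nums (j + 1) i) := by
  rw [segGcd]; simp [h]

theorem segGcd_succ_right (nums : List Int) : ∀ (d j i : Nat), i - j = d → j ≤ i →
    segGcd nums j (i + 1) = Nat.gcd (segGcd nums j i) (nums.getD (i + 1) 0).natAbs := by
  intro d
  induction d with
  | zero =>
    intro j i hd hle
    have hji : j = i := by omega
    subst hji
    rw [segGcd_unfold nums (by omega : j < j + 1), segGcd_last, segGcd_last]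
  | succ d ih =>
    intro j i hd hle
    have hji : j < i := by omega
    rw [segGcd_unfold nums (by omega : j < i + 1), segGcd_unfold nums hji,
      ih (j + 1) i (by omega) (by omega), Nat.gcd_assoc]

theorem segGcd_dvd (nums : List Int) : ∀ (d j k i : Nat), k - j = d → j ≤ k → k ≤ i →
    segGcd nums j i ∣ segGcd nums k i := by
  intro d
  induction d with
  | zero =>
    intro j k i hd h1 h2
    have : j = k := by omega
    subst this; exact dvd_rfl
  | succ d ih =>
    intro j k i hd h1 h2
    have hji : j < i := by omega
    calc segGcd nums j i ∣ segGcd nums (j + 1) i := by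
          rw [segGcd_unfold nums hji]; exact Nat.gcd_dvd_right _ _
      _ ∣ segGcd nums k i := ih (j + 1) k i (by omega) (by omega) h2

-- ===== dedup functional lemmas =====

theorem pvDGo_congr {p q : Int × Int} (h : p.1 = q.1) (L : List (Int × Int)) :
    pvDGo p L = pvDGo q L := by
  cases L with
  | nil => rfl
  | cons y ys => simp [pvDGo, h]

theorem pvDGo_snoc : ∀ (L : List (Int × Int)) (p y : Int × Int),
    pvDGo p (L ++ [y]) = pvDGo p L ++ (if y.1 = (L.getLastD p).1 then [] else [y]) := by
  intro L
  induction L with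
  | nil => intro p y; simp [pvDGo]
  | cons x xs ih =>
    intro p y
    simp only [List.cons_append, pvDGo]
    rw [List.getLastD_cons]
    by_cases hx : x.1 = p.1
    · rw [if_pos hx, if_pos hx, ih x y]
    · rw [if_neg hx, if_neg hx, ih x y, List.cons_append]

theorem pvDedup_snoc (L : List (Int × Int)) (hL : L ≠ []) (y : Int × Int) (d : Int × Int) :
    pvDedup (L ++ [y]) = pvDedup L ++ (if y.1 = (L.getLastD d).1 then [] else [y]) := by
  cases L with
  | nil => exact absurd rfl hL
  | cons x xs =>
    simp only [List.cons_append, pvDedup, pvDGo_snoc]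
    rw [List.getLastD_cons]

-- ===== the index-based dedup loop equals pvDedup =====

theorem take_set_succ {α : Type} (l : List α) (i : Nat) (v : α) (h : i < l.length) :
    (l.set i v).take (i + 1) = l.take i ++ [v] := by
  rw [List.take_set, List.take_add_one, List.getElem?_eq_getElem h]
  have hlen : (l.take i).length = i := by simp; omega
  rw [Option.toList_some, List.set_append_right i v (by omega), hlen]
  simp

theorem set_getD_self (l : List (Int × Int)) (i : Nat) (h : i < l.length) :
    l.set i (l.getD i (0, 0)) = l := by
  have : l.getD i (0, 0) = l[i] := by
    simp [List.getD_eq_getElem?_getD, List.getElem?_eq_getElem h]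
  rw [this, List.set_getElem_self h]

theorem getLastD_take (l : List (Int × Int)) (j : Nat) (h1 : 1 ≤ j) (h2 : j ≤ l.length) (d : Int × Int) :
    (l.take j).getLastD d = l.getD (j - 1) (0, 0) := by
  have hlen : (l.take j).length = j := by simp; omega
  have h3 : j - 1 < l.length := by omega
  rw [List.getLastD_eq_getLast?, List.getLast?_eq_getElem?, hlen]
  rw [List.getElem?_take_of_lt (by omega), List.getElem?_eq_getElem h3]
  simp [List.getD_eq_getElem?_getD, List.getElem?_eq_getElem h3]

theorem dedup_take_succ (l : List (Int × Int)) (j : Nat) (h1 : 1 ≤ j) (h2 : j < l.length) :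
    pvDedup (l.take (j + 1)) =
      pvDedup (l.take j) ++
        (if (l.getD j (0, 0)).1 = (l.getD (j - 1) (0, 0)).1 then [] else [l.getD j (0, 0)]) := by
  have hne : l.take j ≠ [] := by
    intro hc
    rcases List.take_eq_nil_iff.mp hc with h | h
    · omega
    · subst h; simp at h2
  have : l.take (j + 1) = l.take j ++ [l.getD j (0, 0)] := by
    rw [List.take_add_one]
    congr 1
    simp [List.getElem?_eq_getElem h2, List.getD_eq_getElem?_getD]
  rw [this, pvDedup_snoc (l.take j) hne _ (0, 0), getLastD_take l j h1 (by omega) _]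

theorem dedup_loop_inv (l : List (Int × Int)) : ∀ (m j : Nat) (cur : List (Int × Int)) (idx : Nat),
    j + m = l.length → 1 ≤ idx → idx ≤ j → cur.length = l.length →
    cur.take idx = pvDedup (l.take j) →
    (∀ k, idx ≤ k → cur.getD k (0, 0) = l.getD k (0, 0)) →
    (idx = j → cur = l) →
    (((List.range' j m).foldl logTrickDedup (cur, idx)).1.take
      ((List.range' j m).foldl logTrickDedup (cur, idx)).2) = pvDedup l := by
  intro m
  induction m with
  | zero =>
    intro j cur idx hjm h1 h2 hlen htake hrest hful
    have : j = l.length := by omega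
    subst this
    simp only [List.range', List.foldl_nil]
    rw [htake, List.take_length]
  | succ m ih =>
    intro j cur idx hjm h1 h2 hlen htake hrest hful
    have hj : j < l.length := by omega
    have hcurj : cur.getD j (0, 0) = l.getD j (0, 0) := hrest j h2
    have hcurj1 : cur.getD (j - 1) (0, 0) = l.getD (j - 1) (0, 0) := by
      by_cases hc : idx ≤ j - 1
      · exact hrest (j - 1) hc
      · have : idx = j := by omega
        rw [hful this]
    rw [List.range'_succ, List.foldl_cons]
    have hstep : logTrickDedup (cur, idx) j =
        if (l.getD j (0, 0)).1 = (l.getD (j - 1) (0, 0)).1 then (cur, idx)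
        else (cur.set idx (l.getD j (0, 0)), idx + 1) := by
      unfold logTrickDedup
      simp only [hcurj, hcurj1]
      by_cases hd : (l.getD j (0, 0)).1 = (l.getD (j - 1) (0, 0)).1
      · simp [hd]
      · simp [hd]
    rw [hstep]
    by_cases hd : (l.getD j (0, 0)).1 = (l.getD (j - 1) (0, 0)).1
    · rw [if_pos hd]
      apply ih (j + 1) cur idx (by omega) h1 (by omega) hlen
      · rw [htake, dedup_take_succ l j (by omega) hj, if_pos hd, List.append_nil]
      · exact hrest
      · intro h; omega
    · rw [if_neg hd]
      have hidxlt : idx < cur.length := by omega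
      apply ih (j + 1) (cur.set idx (l.getD j (0, 0))) (idx + 1) (by omega) (by omega) (by omega)
        (by simp [hlen])
      · rw [take_set_succ cur idx _ hidxlt, htake, dedup_take_succ l j (by omega) hj, if_neg hd]
      · intro k hk
        have heq : (cur.set idx (l.getD j (0, 0))).getD k (0, 0) = cur.getD k (0, 0) := by
          simp [List.getD_eq_getElem?_getD, List.getElem?_set_ne (by omega : idx ≠ k)]
        rw [heq]
        exact hrest k (by omega)
      · intro hEq
        have hij : idx = j := by omega
        subst hij
        have hcl : cur = l := hful rfl
        subst hcl
        exact set_getD_self cur idx (by omega)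

theorem dedup_loop_eq (l : List (Int × Int)) (hl : l ≠ []) :
    (((List.range' 1 (l.length - 1)).foldl logTrickDedup (l, 1)).1.take
      ((List.range' 1 (l.length - 1)).foldl logTrickDedup (l, 1)).2) = pvDedup l := by
  have hlen : 1 ≤ l.length := by
    cases l with
    | nil => exact absurd rfl hl
    | cons x xs => simp
  apply dedup_loop_inv l (l.length - 1) 1 l 1 (by omega) le_rfl le_rfl rfl
  · cases l with
    | nil => exact absurd rfl hl
    | cons x xs => simp [pvDedup, pvDGo]
  · intro k _; rfl
  · intro h
    rfl

-- ===== map-collapse and ones-elimination =====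

theorem pvFA_fst (a : Int) {p q : Int × Int} (h : p.1 = q.1) : (pvFA a p).1 = (pvFA a q).1 := by
  simp [pvFA, h]

theorem dgo_map_collapse (a : Int) : ∀ (L : List (Int × Int)) (p : Int × Int) (T : List (Int × Int)),
    pvDGo (pvFA a p) ((pvDGo p L).map (pvFA a) ++ T) = pvDGo (pvFA a p) (L.map (pvFA a) ++ T) := by
  intro L
  induction L with
  | nil => intro p T; rfl
  | cons y ys ih =>
    intro p T
    simp only [pvDGo, List.map_cons, List.cons_append]
    by_cases hy : y.1 = p.1
    · rw [if_pos hy, if_pos (pvFA_fst a hy)]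
      rw [pvDGo_congr (pvFA_fst a hy.symm) ((pvDGo y ys).map (pvFA a) ++ T), ih y T]
      try exact pvDGo_congr (pvFA_fst a hy) _
    · rw [if_neg hy]
      by_cases hfy : (pvFA a y).1 = (pvFA a p).1
      · simp only [List.map_cons, List.cons_append, pvDGo, if_pos hfy]
        exact ih y T
      · simp only [List.map_cons, List.cons_append, pvDGo, if_neg hfy]
        rw [ih y T]

theorem dedup_map_collapse (a : Int) (L T : List (Int × Int)) :
    pvDedup ((pvDedup L).map (pvFA a) ++ T) = pvDedup (L.map (pvFA a) ++ T) := by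
  cases L with
  | nil => rfl
  | cons x xs =>
    simp only [pvDedup, List.map_cons, List.cons_append]
    rw [dgo_map_collapse a xs x T]

theorem dgo_ones_dw : ∀ (os X : List (Int × Int)) (p : Int × Int), p.1 = 1 →
    (∀ q ∈ os, q.1 = 1) → pvDW (pvDGo p (os ++ X)) = pvDW (pvDedup X) := by
  intro os
  induction os with
  | nil =>
    intro X p hp _
    cases X with
    | nil => rfl
    | cons x xs =>
      simp only [List.nil_append, pvDGo, pvDedup]
      by_cases hx : x.1 = p.1
      · rw [if_pos hx, pvDW, pvDW, List.dropWhile_cons]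
        simp [hx, hp]
      · rw [if_neg hx]
  | cons o os ih =>
    intro X p hp hos
    simp only [List.cons_append, pvDGo]
    rw [if_pos (by rw [hos o (by simp), hp])]
    exact ih X o (hos o (by simp)) (fun q hq => hos q (by simp [hq]))

theorem ones_elim : ∀ (ones X : List (Int × Int)), (∀ q ∈ ones, q.1 = 1) →
    pvDW (pvDedup (ones ++ X)) = pvDW (pvDedup X) := by
  intro ones X hones
  cases ones with
  | nil => rfl
  | cons o os =>
    simp only [List.cons_append, pvDedup]
    rw [pvDW, List.dropWhile_cons]
    simp only [hones o (by simp), beq_self_eq_true, if_pos]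
    exact dgo_ones_dw os X o (hones o (by simp)) (fun q hq => hones q (by simp [hq]))

-- ===== model = canonical pairs =====

theorem intGcd_natCast (n : Nat) (a : Int) : (Int.gcd (n : Int) a : Int) = (Nat.gcd n a.natAbs : Int) := by
  simp [Int.gcd]

theorem map_pairs (nums : List Int) (i : Nat) :
    (pairsL nums i).map (pvFA (nums.getD (i + 1) 0)) ++ [(nums.getD (i + 1) 0, ((i + 1 : Nat) : Int))] =
      pairsL nums (i + 1) := by
  unfold pairsL
  rw [List.map_append, List.map_map, List.range_succ, List.map_append]
  simp only [List.map_cons, List.map_nil]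
  rw [List.append_assoc, List.append_assoc]
  congr 1
  · apply List.map_congr_left
    intro j hj
    have hj' : j < i := List.mem_range.mp hj
    simp only [Function.comp_apply, pvFA]
    rw [intGcd_natCast, ← segGcd_succ_right nums (i - j) j i (by omega) (by omega)]
  · have h1 : segGcd nums i (i + 1) = Nat.gcd (nums.getD i 0).natAbs (nums.getD (i + 1) 0).natAbs := by
      rw [segGcd_unfold nums (by omega : i < i + 1), segGcd_last]
    simp [pvFA, h1, Int.gcd]

theorem model_eq (nums : List Int) : ∀ (i : Nat), modelAcc nums (i + 1) = pvDW (pvDedup (pairsL nums i)) := by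
  intro i
  induction i with
  | zero =>
    simp [modelAcc, pairsL]
  | succ i ih =>
    show pvDW (pvDedup ((modelAcc nums (i + 1)).map (pvFA (nums.getD (i + 1) 0)) ++
      [(nums.getD (i + 1) 0, ((i + 1 : Nat) : Int))])) = _
    rw [ih]
    set a := nums.getD (i + 1) 0 with ha
    set M := pvDedup (pairsL nums i) with hM
    set T : List (Int × Int) := [(a, ((i + 1 : Nat) : Int))] with hT
    have hsplit : M = M.takeWhile (fun q => q.1 == 1) ++ pvDW M := by
      rw [pvDW, List.takeWhile_append_dropWhile]
    have hones : ∀ q ∈ (M.takeWhile (fun q => q.1 == 1)).map (pvFA a), q.1 = 1 := by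
      intro q hq
      obtain ⟨r, hr, hrq⟩ := List.mem_map.mp hq
      have hb := List.mem_takeWhile_imp (p := fun q : Int × Int => q.1 == 1) hr
      have hr1 : r.1 = 1 := by simpa using hb
      rw [← hrq]
      simp [pvFA, hr1, Int.gcd]
    calc pvDW (pvDedup ((pvDW M).map (pvFA a) ++ T))
        = pvDW (pvDedup ((M.takeWhile (fun q => q.1 == 1)).map (pvFA a) ++ ((pvDW M).map (pvFA a) ++ T))) := by
          rw [ones_elim _ _ hones]
      _ = pvDW (pvDedup (M.map (pvFA a) ++ T)) := by
          rw [← List.append_assoc, ← List.map_append, ← hsplit]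
      _ = pvDW (pvDedup ((pairsL nums i).map (pvFA a) ++ T)) := by
          rw [hM, dedup_map_collapse]
      _ = pvDW (pvDedup (pairsL nums (i + 1))) := by
          rw [hT, ha, map_pairs nums i]

-- ===== head characterization =====

theorem modelHead_eq (nums : List Int) (i : Nat) :
    modelHead nums i =
      (if h : ∃ j, j ≤ i ∧ segGcd nums j i ≠ 1 then ((Nat.find h : Nat) : Int) else (i : Int)) := by
  rw [modelHead, model_eq]
  by_cases h : ∃ j, j ≤ i ∧ segGcd nums j i ≠ 1
  · rw [dif_pos h]
    generalize hj0 : Nat.find h = j0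
    have hspec := Nat.find_spec h
    rw [hj0] at hspec
    obtain ⟨hj0le, hj0ne⟩ := hspec
    have hlt : ∀ j, j < j0 → segGcd nums j i = 1 := by
      intro j hj
      have hmin := Nat.find_min h (by rw [hj0]; exact hj)
      by_contra hne
      exact hmin ⟨by omega, hne⟩
    have honesr : ∀ q ∈ (List.range j0).map (fun j => ((segGcd nums j i : Int), (j : Int))), q.1 = 1 := by
      intro q hq
      obtain ⟨j, hj, hjq⟩ := List.mem_map.mp hq
      rw [← hjq]
      simp [hlt j (List.mem_range.mp hj)]
    by_cases hcase : j0 = i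
    · subst hcase
      have hp : pairsL nums j0 = ((List.range j0).map (fun j => ((segGcd nums j j0 : Int), (j : Int)))) ++
          [(nums.getD j0 0, (j0 : Int))] := rfl
      rw [hp, ones_elim _ _ honesr]
      have hne1 : nums.getD j0 0 ≠ 1 := by
        intro hc
        apply hj0ne
        rw [segGcd_last, hc]
        rfl
      have hne1' : nums[j0]?.getD 0 ≠ 1 := by
        simpa [List.getD_eq_getElem?_getD] using hne1
      simp only [pvDedup, pvDGo, pvDW, List.dropWhile_cons]
      simp [hne1']
    · have hj0i : j0 < i := by omega
      have hrange : List.range i = List.range j0 ++ List.range' j0 (i - j0) := by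
        rw [List.range_eq_range', List.range_eq_range']
        have hap := List.range'_append (s := 0) (m := j0) (n := i - j0) (step := 1)
        simp only [Nat.zero_add, Nat.one_mul] at hap
        rw [hap]
        congr 1
        omega
      have hrange2 : List.range' j0 (i - j0) = j0 :: List.range' (j0 + 1) (i - j0 - 1) := by
        have hd : i - j0 = (i - j0 - 1) + 1 := by omega
        rw [hd, List.range'_succ]
        have he : i - j0 - 1 + 1 - 1 = i - j0 - 1 := by omega
        rw [he]
      have hpairs : pairsL nums i =
          ((List.range j0).map (fun j => ((segGcd nums j i : Int), (j : Int)))) ++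
          (((segGcd nums j0 i : Int), (j0 : Int)) ::
            ((List.range' (j0 + 1) (i - j0 - 1)).map (fun j => ((segGcd nums j i : Int), (j : Int))) ++
              [(nums.getD i 0, (i : Int))])) := by
        unfold pairsL
        rw [hrange, List.map_append, hrange2, List.map_cons, List.append_assoc, List.cons_append]
      rw [hpairs, ones_elim _ _ honesr]
      have hne1 : ((segGcd nums j0 i : Int)) ≠ 1 := by
        intro hc
        exact hj0ne (by exact_mod_cast hc)
      simp only [pvDedup, pvDW, List.dropWhile_cons]
      simp [hne1]
  · rw [dif_neg h]
    have h : ∀ j, j ≤ i → segGcd nums j i = 1 := by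
      intro j hj
      by_contra hne
      exact h ⟨j, hj, hne⟩
    have honesr : ∀ q ∈ (List.range i).map (fun j => ((segGcd nums j i : Int), (j : Int))), q.1 = 1 := by
      intro q hq
      obtain ⟨j, hj, hjq⟩ := List.mem_map.mp hq
      rw [← hjq]
      simp [h j (by have := List.mem_range.mp hj; omega)]
    have hp : pairsL nums i = ((List.range i).map (fun j => ((segGcd nums j i : Int), (j : Int)))) ++
        [(nums.getD i 0, (i : Int))] := rfl
    rw [hp, ones_elim _ _ honesr]
    by_cases hv : nums.getD i 0 = 1
    · have hv' : nums[i]?.getD 0 = 1 := by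
        simpa [List.getD_eq_getElem?_getD] using hv
      simp [pvDedup, pvDGo, pvDW, hv']
    · have hv' : nums[i]?.getD 0 ≠ 1 := by
        simpa [List.getD_eq_getElem?_getD] using hv
      simp only [pvDedup, pvDGo, pvDW, List.dropWhile_cons]
      simp [hv']

-- ===== B computes the same head =====

theorem go_down (nums : List Int) (i j0 : Nat) (hj0 : j0 ≤ i)
    (hne : segGcd nums j0 i ≠ 1) (hlt : ∀ j, j < j0 → segGcd nums j i = 1) :
    ∀ (c j : Nat) (g best : Int), j0 ≤ j → j ≤ i → j0 + c = j →
      Int.gcd g (nums.getD j 0) = segGcd nums j i →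
      logTrickGo nums j g best = (j0 : Int) := by
  intro c
  induction c with
  | zero =>
    intro j g best h1 h2 h3 hg
    have : j = j0 := by omega
    subst this
    rw [logTrickGo]
    have hgne : ((Int.gcd g (nums.getD j 0) : Int)) ≠ 1 := by
      rw [hg]; intro hc; exact hne (by exact_mod_cast hc)
    rw [if_neg hgne]
    by_cases hz : j = 0
    · simp [hz]
    · rw [dif_neg hz]
      -- next step: gcd hits 1 at j-1 and best = j is returned
      rw [logTrickGo]
      have hj1 : j - 1 < i := by omega
      have hstep : Int.gcd ((Int.gcd g (nums.getD j 0) : Int)) (nums.getD (j - 1) 0) =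
          segGcd nums (j - 1) i := by
        rw [hg]
        have hcast : ((segGcd nums j i : Int)).gcd (nums.getD (j - 1) 0) =
            Nat.gcd (segGcd nums j i) (nums.getD (j - 1) 0).natAbs := by
          simp [Int.gcd]
        rw [hcast, segGcd_unfold nums hj1]
        have hsucc : j - 1 + 1 = j := by omega
        rw [hsucc, Nat.gcd_comm]
      have : segGcd nums (j - 1) i = 1 := hlt (j - 1) (by omega)
      rw [if_pos (by rw [hstep, this]; rfl)]
  | succ c ih =>
    intro j g best h1 h2 h3 hg
    rw [logTrickGo]
    have hjne : segGcd nums j i ≠ 1 := by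
      intro hc
      apply hne
      have := segGcd_dvd nums (j - j0) j0 j i rfl (by omega) h2
      rw [hc] at this
      exact Nat.eq_one_of_dvd_one this
    have hgne : ((Int.gcd g (nums.getD j 0) : Int)) ≠ 1 := by
      rw [hg]; intro hc; exact hjne (by exact_mod_cast hc)
    rw [if_neg hgne]
    have hz : j ≠ 0 := by omega
    rw [dif_neg hz]
    apply ih (j - 1) _ _ (by omega) (by omega) (by omega)
    rw [hg]
    have hj1 : j - 1 < i := by omega
    have hcast : ((segGcd nums j i : Int)).gcd (nums.getD (j - 1) 0) =
        Nat.gcd (segGcd nums j i) (nums.getD (j - 1) 0).natAbs := by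
      simp [Int.gcd]
    rw [hcast, segGcd_unfold nums hj1]
    have hsucc : j - 1 + 1 = j := by omega
    rw [hsucc, Nat.gcd_comm]

theorem alt_head (nums : List Int) (i : Nat) :
    logTrickGo nums i 0 (i : Int) =
      (if h : ∃ j, j ≤ i ∧ segGcd nums j i ≠ 1 then ((Nat.find h : Nat) : Int) else (i : Int)) := by
  by_cases h : ∃ j, j ≤ i ∧ segGcd nums j i ≠ 1
  · rw [dif_pos h]
    obtain ⟨hj0le, hj0ne⟩ := Nat.find_spec h
    refine go_down nums i (Nat.find h) hj0le hj0ne ?_ (i - Nat.find h) i 0 (i : Int)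
      hj0le le_rfl (by omega) ?_
    · intro j hj
      have := Nat.find_min h hj
      by_contra hne
      exact this ⟨by omega, hne⟩
    · rw [segGcd_last]
      simp [Int.gcd]
  · rw [dif_neg h]
    have h : ∀ j, j ≤ i → segGcd nums j i = 1 := by
      intro j hj
      by_contra hne
      exact h ⟨j, hj, hne⟩
    rw [logTrickGo]
    have : Int.gcd 0 (nums.getD i 0) = segGcd nums i i := by
      rw [segGcd_last]; simp [Int.gcd]
    rw [if_pos (by rw [this, h i le_rfl]; rfl)]

-- ===== assembling the A port =====

theorem set_map_range (n k : Nat) (f g : Nat → Int) (v : Int) (hk : k < n)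
    (hfg : ∀ t, t ≠ k → f t = g t) (hv : g k = v) :
    ((List.range n).map f).set k v = (List.range n).map g := by
  apply List.ext_getElem?
  intro t
  by_cases ht : t < n
  · by_cases htk : t = k
    · subst htk
      rw [List.getElem?_set_self' ]
      simp [List.getElem?_map, List.getElem?_range ht, hv]
    · rw [List.getElem?_set_ne (by omega)]
      simp [List.getElem?_map, List.getElem?_range ht, hfg t htk]
  · have h1 : (((List.range n).map f).set k v)[t]? = none :=
      List.getElem?_eq_none (by simp; omega)
    have h2 : ((List.range n).map g)[t]? = none :=
      List.getElem?_eq_none (by simp; omega)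
    rw [h1, h2]

def retExp (nums : List Int) (k : Nat) : List Int :=
  (List.range nums.length).map (fun t => if t < k then modelHead nums t else (t : Int))

theorem stepA_inv (nums : List Int) : ∀ (k : Nat), k ≤ nums.length →
    ((PySem.List.enumerate nums 0).take k).foldl logTrickStep
      ((List.range nums.length).map (fun (i : Nat) => (i : Int)), []) = (retExp nums k, modelAcc nums k) := by
  intro k
  induction k with
  | zero =>
    intro _
    simp only [List.take_zero, List.foldl_nil, modelAcc]
    congr 1
  | succ k ih =>
    intro hk
    have hk' : k < nums.length := by omega
    have htk : (PySem.List.enumerate nums 0).take (k + 1) =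
        (PySem.List.enumerate nums 0).take k ++ [((k : Int), nums[k])] := by
      rw [List.take_add_one]
      congr 1
      rw [PySem.List.getElem?_enumerate]
      simp [List.getElem?_eq_getElem hk']
    rw [htk, List.foldl_append, ih (by omega), List.foldl_cons, List.foldl_nil]
    unfold logTrickStep
    simp only
    have hgetD : nums[k] = nums.getD k 0 := by
      simp [List.getD_eq_getElem?_getD, List.getElem?_eq_getElem hk']
    have hacc2 : (modelAcc nums k).map (fun q => ((Int.gcd q.1 nums[k] : Int), q.2)) ++ [(nums[k], (k : Int))] =
        (modelAcc nums k).map (pvFA (nums.getD k 0)) ++ [(nums.getD k 0, (k : Int))] := by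
      rw [hgetD]
      rfl
    rw [hacc2]
    set acc2 := (modelAcc nums k).map (pvFA (nums.getD k 0)) ++ [(nums.getD k 0, (k : Int))] with hacc2def
    have hne : acc2 ≠ [] := by simp [hacc2def]
    have hdedup := dedup_loop_eq acc2 hne
    rw [hdedup]
    have hmodel : (pvDedup acc2).dropWhile (fun q => q.1 == 1) = modelAcc nums (k + 1) := by
      rw [hacc2def]
      rfl
    rw [hmodel]
    have htoNat : ((k : Int)).toNat = k := by simp
    congr 1
    cases hcase : modelAcc nums (k + 1) with
    | nil =>
      rw [if_neg (by simp)]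
      unfold retExp
      apply List.map_congr_left
      intro t ht
      by_cases htlt : t < k
      · rw [if_pos htlt, if_pos (by omega : t < k + 1)]
      · by_cases htke : t = k
        · subst htke
          have hmh : modelHead nums t = (t : Int) := by
            rw [modelHead, hcase]
          rw [if_neg htlt, if_pos (by omega : t < t + 1), hmh]
        · rw [if_neg htlt, if_neg (by omega : ¬ t < k + 1)]
    | cons p rest =>
      rw [if_pos (by simp)]
      rw [htoNat]
      unfold retExp
      apply set_map_range nums.length k _ _ _ hk'
      · intro t htk2
        by_cases htlt : t < k
        · rw [if_pos htlt, if_pos (by omega : t < k + 1)]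
        · rw [if_neg htlt, if_neg (by omega : ¬ t < k + 1)]
      · have hmh : modelHead nums k = p.2 := by
          rw [modelHead, hcase]
        rw [if_pos (by omega : k < k + 1), hmh]
        rfl

-- ===== VERDICT (by name: the statement is the Claim_ definition above) =====
theorem logTrick_spec : Claim_equal_logTrick := by
  intro nums _
  unfold Spec_logTrick logTrick logTrick_alt
  have hlen : (PySem.List.enumerate nums 0).length = nums.length := by
    simp [PySem.List.length_enumerate]
  have htake : (PySem.List.enumerate nums 0).take nums.length = PySem.List.enumerate nums 0 := by
    rw [← hlen, List.take_length]
  simp only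
  rw [← htake, stepA_inv nums nums.length le_rfl]
  unfold retExp
  apply List.map_congr_left
  intro t ht
  have htlt : t < nums.length := List.mem_range.mp ht
  rw [if_pos htlt, modelHead_eq, ← alt_head]
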